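-- pv_equiv track=rewrite | github.com/markusschloesser/MackieC4_P3 | EncoderController.py | __transform_to_size
-- ===== SOURCE A (Python) =====
-- from builtins import range
--
-- def __transform_to_size(raw_text, new_size):
--     """ trim a string down to a given new_size, removing trailing or leading blank spaces first
--         followed by a trailing 'dB' substring (if a '.' is also found somewhere in string)
--         followed by spaces and lower case vowels in order [' ', 'i', 'o', 'u', 'e', 'a']
--         or center smaller length strings within the new_size
--         returns a string exactly new_size
--     """
--     if not raw_text or not isinstance(raw_text, str):
--         return ''.join(list((' ' for i in range(new_size))))  # if given nothing return blanks
--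
--     transformed_text = raw_text.strip()
--     is_ends_db = transformed_text.endswith('dB')
--     has_dot = transformed_text.find('.') != -1
--     if len(transformed_text) > new_size and is_ends_db and has_dot:
--         transformed_text = transformed_text[:-2]  # remove the trailing 'dB'
--
--     if len(transformed_text) > new_size:
--         for um in (' ', 'i', 'o', 'u', 'e', 'a'):  # MS rounded or eckige Brackets? Sissy had eckig, decompiled Live11 had rounded
--             while len(transformed_text) > new_size and transformed_text.rfind(um, 1) != -1:
--                 um_pos = transformed_text.rfind(um, 1)
--                 transformed_text = transformed_text[:um_pos]
--                 if len(transformed_text) > um_pos + 1:  # if um_pos is last char, um_pos + 1 is OB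
--                     transformed_text += transformed_text[um_pos + 1:]
--
--     transformed_text = transformed_text.center(new_size)
--     return ''.join([transformed_text[i] for i in range(new_size)])
-- ===== SOURCE B (Python) =====
-- def __transform_to_size(raw_text, new_size):
--     """Trim/center raw_text to exactly new_size characters (B: closed-form cut
--     per vowel instead of A's repeated rfind-and-chop loop)."""
--     if not raw_text or not isinstance(raw_text, str):
--         return ' ' * max(new_size, 0)
--
--     t = raw_text.strip()
--     if len(t) > new_size and t.endswith('dB') and '.' in t:
--         t = t[:-2]
--
--     for um in (' ', 'i', 'o', 'u', 'e', 'a'):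
--         if len(t) > new_size:
--             positions = [i for i, ch in enumerate(t) if ch == um and i >= 1]
--             if positions:
--                 keep = [p for p in positions if p <= new_size]
--                 cut = keep[-1] if keep else positions[0]
--                 t = t[:cut]
--
--     t = t.center(new_size)
--     return t[:new_size] if new_size > 0 else ''
-- ===== Notes on version B (the rewrite author's own statement) =====
-- stated objective: faster
-- what changed: Replaces A's per-vowel repeated rfind-and-chop while loop (and its dead append branch) by a single closed-form cut: collect the vowel's positions >= 1 in one pass and cut once, at the largest position <= new_size or else at the first position.
import Mathlib
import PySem

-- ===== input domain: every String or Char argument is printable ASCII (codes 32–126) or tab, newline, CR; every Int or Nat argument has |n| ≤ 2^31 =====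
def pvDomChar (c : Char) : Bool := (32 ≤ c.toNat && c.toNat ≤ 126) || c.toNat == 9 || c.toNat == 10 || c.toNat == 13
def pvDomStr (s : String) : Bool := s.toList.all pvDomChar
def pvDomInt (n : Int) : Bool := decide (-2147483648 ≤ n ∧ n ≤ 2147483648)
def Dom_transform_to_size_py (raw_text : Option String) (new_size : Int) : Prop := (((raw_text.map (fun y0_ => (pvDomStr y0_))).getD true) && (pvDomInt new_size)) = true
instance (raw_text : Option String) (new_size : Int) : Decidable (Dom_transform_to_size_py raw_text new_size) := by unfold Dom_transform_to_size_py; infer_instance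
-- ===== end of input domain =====

-- B replaces A's repeated rfind-and-chop vowel-removal loop by one closed-form cut per vowel; return-value equivalence proved.

-- ===== PORT A =====
-- exact hand port of CPython str.center (for width > len: left = marg//2 + (marg & width & 1)); shared builtin helper
def pyCenter (cs : List Char) (width : Int) : List Char :=
  if width ≤ (cs.length : Int) then cs
  else
    let marg : Int := width - (cs.length : Int)
    let left : Int := PySem.Int.floordiv marg 2 + PySem.Int.band (PySem.Int.band marg width) 1
    (List.replicate left.toNat ' ' ++ cs) ++ List.replicate (marg - left).toNat ' '

-- ''.join(' ' for i in range(new_size))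
def aBlanks (n : Int) : List Char := (PySem.List.pyRange 0 n 1).map (fun _ => ' ')

-- transformed_text.rfind(um, 1)
def pyRfind1 (t : List Char) (c : Char) : Int := PySem.Chars.rfindFrom t [c] 1 none

-- body of one iteration of A's inner while loop: t[:um_pos] plus the (dead) append branch
def aChop (t : List Char) (um_pos : Int) : List Char :=
  let t1 := PySem.List.slice t none (some um_pos)
  if (t1.length : Int) > um_pos + 1 then t1 ++ PySem.List.slice t1 (some (um_pos + 1)) none else t1

-- facts cited by aLoop's decreasing_by (and reused below)

theorem prefixOf_drop (s : List Char) (c : Char) (i : Nat) : [c].isPrefixOf (s.drop i) = true ↔ s[i]? = some c := by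
  rw [List.isPrefixOf_iff_prefix, ← List.head?_drop]
  cases s.drop i with
  | nil => simp
  | cons a as => simp [List.cons_prefix_cons, eq_comm]

theorem go_spec (s : List Char) (c : Char) (k : Nat) :
    (PySem.Chars.rfind.go s [c] k = -1 ∧ ∀ i ≤ k, ¬ s[i]? = some c) ∨
    (∃ m : Nat, PySem.Chars.rfind.go s [c] k = (m:Int) ∧ m ≤ k ∧ s[m]? = some c ∧ ∀ i, m < i → i ≤ k → ¬ s[i]? = some c) := by
  induction k with
  | zero =>
    by_cases h : s[0]? = some c
    · right; exact ⟨0, by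
        have := (prefixOf_drop s c 0).mpr h
        simp only [PySem.Chars.rfind.go]
        rw [if_pos (by simpa using this)]
        simp, by omega, h, by omega⟩
    · left
      constructor
      · simp only [PySem.Chars.rfind.go]
        rw [if_neg]
        intro hc
        exact h ((prefixOf_drop s c 0).mp (by simpa using hc))
      · intro i hi; interval_cases i; exact h
  | succ j ih =>
    rw [PySem.Chars.rfind.go]
    by_cases h : s[j+1]? = some c
    · right
      refine ⟨j+1, ?_, le_refl _, h, by omega⟩
      simp [(prefixOf_drop s c (j+1)).mpr h]
    · have hnp : ¬ ([c].isPrefixOf (List.drop (j+1) s) = true) := fun hc => h ((prefixOf_drop s c (j+1)).mp hc)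
      rw [if_neg hnp]
      rcases ih with ⟨h1, h2⟩ | ⟨m, hm, hmk, hmc, hmax⟩
      · left; refine ⟨h1, fun i hi => ?_⟩
        rcases Nat.lt_or_ge i (j+1) with hlt | hge
        · exact h2 i (by omega)
        · have : i = j+1 := by omega
          subst this; exact h
      · right
        refine ⟨m, hm, by omega, hmc, fun i h1 h2 => ?_⟩
        rcases Nat.lt_or_ge i (j+1) with hlt | hge
        · exact hmax i h1 (by omega)
        · have : i = j+1 := by omega
          subst this; exact h

theorem rfind1_cases (t : List Char) (c : Char) :
    (pyRfind1 t c = -1 ∧ ∀ i : Nat, 1 ≤ i → ¬ t[i]? = some c) ∨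
    (∃ m : Nat, pyRfind1 t c = (m:Int) ∧ 1 ≤ m ∧ t[m]? = some c ∧ ∀ i : Nat, m < i → ¬ t[i]? = some c) := by
  unfold pyRfind1 PySem.Chars.rfindFrom
  norm_num
  by_cases ht : t = []
  · subst ht; left
    refine ⟨by simp, fun i hi => by simp⟩
  · rcases go_spec t.tail c t.tail.length with ⟨h1, h2⟩ | ⟨m, hm, hmk, hmc, hmax⟩
    · left
      have hr : PySem.Chars.rfind t.tail [c] = -1 := by simpa [PySem.Chars.rfind] using h1
      refine ⟨fun _ hc => absurd hr hc, fun i hi hc => ?_⟩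
      obtain ⟨j, rfl⟩ : ∃ j, i = j + 1 := ⟨i - 1, by omega⟩
      rw [← List.getElem?_tail] at hc
      by_cases hj : j ≤ t.tail.length
      · exact h2 j hj hc
      · rw [List.getElem?_eq_none (by omega)] at hc; simp at hc
    · right
      have hr : PySem.Chars.rfind t.tail [c] = (m:Int) := by simpa [PySem.Chars.rfind] using hm
      refine ⟨m + 1, ?_, by omega, by rw [← List.getElem?_tail]; exact hmc, fun i hi hc => ?_⟩
      · rw [if_neg ht, hr, if_neg (by omega)]; push_cast; ring
      · obtain ⟨j, rfl⟩ : ∃ j, i = j + 1 := ⟨i - 1, by omega⟩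
        rw [← List.getElem?_tail] at hc
        by_cases hj : j ≤ t.tail.length
        · exact hmax j (by omega) hj hc
        · rw [List.getElem?_eq_none (by omega)] at hc; simp at hc

theorem rfind1_bounds (t : List Char) (c : Char) (h : pyRfind1 t c ≠ -1) :
    1 ≤ pyRfind1 t c ∧ pyRfind1 t c < (t.length : Int) := by
  rcases rfind1_cases t c with ⟨h1, _⟩ | ⟨m, hm, h1, hc, _⟩
  · exact absurd h1 h
  · have hlt : m < t.length := by
      by_contra hge
      rw [List.getElem?_eq_none (by omega)] at hc; simp at hc
    rw [hm]; constructor <;> [exact_mod_cast h1; exact_mod_cast hlt]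

theorem aChop_eq_take (t : List Char) (p : Int) (h0 : 0 ≤ p) :
    aChop t p = t.take p.toNat := by
  unfold aChop
  rw [PySem.List.slice_to t h0]
  rw [if_neg (by simp [List.length_take]; omega)]

theorem aChop_length_lt (t : List Char) (c : Char) (h : pyRfind1 t c ≠ -1) :
    (aChop t (pyRfind1 t c)).length < t.length := by
  obtain ⟨h1, h2⟩ := rfind1_bounds t c h
  rw [aChop_eq_take _ _ (by omega)]
  simp [List.length_take]
  omega

-- A's inner while loop for one character um = c
def aLoop (t : List Char) (c : Char) (n : Int) : List Char :=
  if h : (t.length : Int) > n ∧ pyRfind1 t c ≠ -1 then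
    aLoop (aChop t (pyRfind1 t c)) c n
  else t
termination_by t.length
decreasing_by exact aChop_length_lt t c h.2

def transform_to_size_py (raw_text : Option String) (new_size : Int) : String :=
  match raw_text with
  | none => String.ofList (aBlanks new_size)
  | some s =>
    if s.toList = [] then String.ofList (aBlanks new_size)
    else
      let t0 := PySem.Chars.strip s.toList
      let t1 := if (t0.length : Int) > new_size ∧ PySem.Chars.endswith t0 ['d','B'] = true ∧ PySem.Chars.find t0 ['.'] ≠ -1
                then PySem.List.slice t0 none (some (-2)) else t0
      let t2 := if (t1.length : Int) > new_size
                then List.foldl (fun u um => aLoop u um new_size) t1 [' ', 'i', 'o', 'u', 'e', 'a']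
                else t1
      let t3 := pyCenter t2 new_size
      String.ofList ((PySem.List.pyRange 0 new_size 1).map (fun i => PySem.List.pyGetD t3 i ' '))

-- ===== PORT B =====
-- [i for i, ch in enumerate(t) if ch == um and i >= 1]
def bPositions (t : List Char) (c : Char) : List Int :=
  ((PySem.List.enumerate t).filter (fun q => q.2 == c && decide (1 ≤ q.1))).map (·.1)

-- B's closed-form per-vowel step: a single cut instead of A's chop loop
def bStep (t : List Char) (c : Char) (n : Int) : List Char :=
  if (t.length : Int) > n then
    let positions := bPositions t c
    if positions = [] then t
    else
      let keep := positions.filter (fun p => decide (p ≤ n))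
      let cut := match keep.getLast? with | some k => k | none => positions.headD 0
      PySem.List.slice t none (some cut)
  else t

def transform_to_size_py_alt (raw_text : Option String) (new_size : Int) : String :=
  match raw_text with
  | none => String.ofList (PySem.List.pyRepeat [' '] (max new_size 0))
  | some s =>
    if s.toList = [] then String.ofList (PySem.List.pyRepeat [' '] (max new_size 0))
    else
      let t0 := PySem.Chars.strip s.toList
      let t1 := if (t0.length : Int) > new_size ∧ PySem.Chars.endswith t0 ['d','B'] = true ∧ PySem.Chars.isIn ['.'] t0 = true
                then PySem.List.slice t0 none (some (-2)) else t0
      let t2 := List.foldl (fun u um => bStep u um new_size) t1 [' ', 'i', 'o', 'u', 'e', 'a']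
      let t3 := pyCenter t2 new_size
      if 0 < new_size then String.ofList (PySem.List.slice t3 none (some new_size)) else ""

-- ===== PRECONDITION & SPEC =====
def Spec_transform_to_size_py (raw_text : Option String) (new_size : Int) (out : String) : Prop := out = transform_to_size_py_alt raw_text new_size
instance (raw_text : Option String) (new_size : Int) (out : String) : Decidable (Spec_transform_to_size_py raw_text new_size out) := by unfold Spec_transform_to_size_py; infer_instance

-- ===== CLAIM (what is proved, stated in full; the proofs are below) =====
def Claim_equal_transform_to_size_py : Prop := ∀ (raw_text : Option String) (new_size : Int), Dom_transform_to_size_py raw_text new_size → Spec_transform_to_size_py raw_text new_size (transform_to_size_py raw_text new_size)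

-- ===== LEMMAS AND PROOFS =====

-- indices i with 1 ≤ i and t[i] = c, as naturals (proof-side mirror of bPositions)
def posNat (t : List Char) (c : Char) : List Nat :=
  (List.range t.length).filter (fun i => decide (1 ≤ i) && decide (t[i]? = some c))

theorem mem_posNat (t : List Char) (c : Char) (i : Nat) :
    i ∈ posNat t c ↔ 1 ≤ i ∧ t[i]? = some c := by
  simp only [posNat, List.mem_filter, List.mem_range, Bool.and_eq_true, decide_eq_true_eq]
  constructor
  · rintro ⟨_, h1, h2⟩; exact ⟨h1, h2⟩
  · rintro ⟨h1, h2⟩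
    refine ⟨?_, h1, h2⟩
    by_contra hge
    rw [List.getElem?_eq_none (by omega)] at h2; simp at h2

theorem posNat_pairwise (t : List Char) (c : Char) : (posNat t c).Pairwise (· < ·) :=
  List.Pairwise.filter _ List.pairwise_lt_range

theorem sorted_eq_of_mem_iff {α : Type} [LinearOrder α] {l1 l2 : List α}
    (h1 : l1.Pairwise (· < ·)) (h2 : l2.Pairwise (· < ·))
    (hm : ∀ x, x ∈ l1 ↔ x ∈ l2) : l1 = l2 := by
  refine List.eq_of_perm_of_sorted (fun a b _ _ hab hba => le_antisymm hab hba)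
    (h1.imp le_of_lt) (h2.imp le_of_lt) ?_
  exact (List.perm_ext_iff_of_nodup (h1.imp ne_of_lt) (h2.imp ne_of_lt)).mpr hm

theorem getLast_max {α : Type} [LinearOrder α] {l : List α} (h : l.Pairwise (· < ·)) {p : α}
    (hl : l.getLast? = some p) : ∀ q ∈ l, q ≤ p := by
  obtain ⟨ys, rfl⟩ := List.getLast?_eq_some_iff.mp hl
  intro q hq
  rcases List.mem_append.mp hq with hq | hq
  · exact le_of_lt ((List.pairwise_append.mp h).2.2 q hq p (by simp))
  · simp at hq; simp [hq]

theorem rfind1_eq_neg_iff (t : List Char) (c : Char) : pyRfind1 t c = -1 ↔ posNat t c = [] := by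
  constructor
  · intro h
    rcases rfind1_cases t c with ⟨_, h2⟩ | ⟨m, hm, h1, hc, _⟩
    · rw [List.eq_nil_iff_forall_not_mem]
      intro i hi
      obtain ⟨hi1, hi2⟩ := (mem_posNat t c i).mp hi
      exact h2 i hi1 hi2
    · rw [hm] at h; omega
  · intro h
    rcases rfind1_cases t c with ⟨h1, _⟩ | ⟨m, hm, h1, hc, _⟩
    · exact h1
    · exfalso
      have : m ∈ posNat t c := (mem_posNat t c m).mpr ⟨h1, hc⟩
      simp [h] at this

theorem rfind1_getLast (t : List Char) (c : Char) (p : Nat)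
    (h : (posNat t c).getLast? = some p) : pyRfind1 t c = (p : Int) := by
  have hpmem : p ∈ posNat t c := List.mem_of_getLast? h
  obtain ⟨hp1, hpc⟩ := (mem_posNat t c p).mp hpmem
  rcases rfind1_cases t c with ⟨h1, h2⟩ | ⟨m, hm, h1, hc, hmax⟩
  · exact absurd hpc (h2 p hp1)
  · have hpm : p ≤ m := by
      by_contra hlt
      exact hmax p (by omega) hpc
    have hmmem : m ∈ posNat t c := (mem_posNat t c m).mpr ⟨h1, hc⟩
    have hmp : m ≤ p := getLast_max (posNat_pairwise t c) h m hmmem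
    have : m = p := by omega
    rw [hm, this]

theorem bPositions_pairwise (t : List Char) (c : Char) : (bPositions t c).Pairwise (· < ·) := by
  apply List.Pairwise.map
  · exact fun a b h => h
  · exact List.Pairwise.filter _ (PySem.List.pairwise_lt_enumerate t 0)

theorem mem_bPositions (t : List Char) (c : Char) (j : Int) :
    j ∈ bPositions t c ↔ ∃ k : Nat, j = (k : Int) ∧ k ∈ posNat t c := by
  simp only [bPositions, List.mem_map, List.mem_filter, PySem.List.mem_enumerate_iff]
  constructor
  · rintro ⟨⟨j', ch⟩, ⟨⟨k, hk, hpair⟩, hcond⟩, rfl⟩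
    obtain ⟨rfl, rfl⟩ : j' = (k:Int) ∧ ch = t[k] := by
      constructor <;> [simpa using congrArg Prod.fst hpair; simpa using congrArg Prod.snd hpair]
    simp only [Bool.and_eq_true, beq_iff_eq, decide_eq_true_eq] at hcond
    refine ⟨k, by simp, (mem_posNat t c k).mpr ⟨by exact_mod_cast hcond.2, by rw [List.getElem?_eq_getElem hk, hcond.1]⟩⟩
  · rintro ⟨k, rfl, hmem⟩
    obtain ⟨h1, h2⟩ := (mem_posNat t c k).mp hmem
    have hk : k < t.length := by
      by_contra hge
      rw [List.getElem?_eq_none (by omega)] at h2; simp at h2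
    refine ⟨((k:Int), t[k]), ⟨⟨k, hk, by simp⟩, ?_⟩, rfl⟩
    have : t[k] = c := by rw [List.getElem?_eq_getElem hk] at h2; simpa using h2
    simp [this]
    exact_mod_cast h1

theorem bPositions_eq (t : List Char) (c : Char) :
    bPositions t c = (posNat t c).map (fun (i : Nat) => (i : Int)) := by
  have hpw : ((posNat t c).map (fun (i : Nat) => (i : Int))).Pairwise (· < ·) := by
    rw [List.pairwise_map]
    exact (posNat_pairwise t c).imp (fun h => by exact_mod_cast h)
  have hmem : ∀ x : Int, x ∈ bPositions t c ↔ x ∈ (posNat t c).map (fun (i : Nat) => (i : Int)) := by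
    intro x
    rw [mem_bPositions, List.mem_map]
    constructor
    · rintro ⟨k, rfl, hk⟩; exact ⟨k, hk, rfl⟩
    · rintro ⟨k, hk, rfl⟩; exact ⟨k, rfl, hk⟩
  exact sorted_eq_of_mem_iff (bPositions_pairwise t c) hpw hmem

theorem posNat_take (t : List Char) (c : Char) (p : Nat) :
    posNat (t.take p) c = (posNat t c).filter (fun i => decide (i < p)) := by
  refine sorted_eq_of_mem_iff (posNat_pairwise _ c)
    (List.Pairwise.filter _ (posNat_pairwise t c)) ?_
  intro i
  rw [mem_posNat, List.mem_filter, mem_posNat]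
  rw [List.getElem?_take]
  constructor
  · rintro ⟨h1, h2⟩
    split at h2
    · exact ⟨⟨h1, h2⟩, by simpa⟩
    · simp at h2
  · rintro ⟨⟨h1, h2⟩, h3⟩
    simp at h3
    rw [if_pos h3]
    exact ⟨h1, h2⟩

theorem bStep_of_le (t : List Char) (c : Char) (n : Int) (h : ¬ (t.length : Int) > n) :
    bStep t c n = t := by
  simp only [bStep, if_neg h]

theorem keep_map (l : List Nat) (n : Int) :
    ((l.map (fun (i : Nat) => (i : Int))).filter (fun p => decide (p ≤ n))) =
      (l.filter (fun (i : Nat) => decide ((i : Int) ≤ n))).map (fun (i : Nat) => (i : Int)) := by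
  rw [List.filter_map]
  rfl

theorem bStep_take (t : List Char) (c : Char) (n : Int) (p : Nat)
    (hn : (t.length : Int) > n) (hLast : (posNat t c).getLast? = some p) :
    bStep t c n = if (p : Int) ≤ n then t.take p else bStep (t.take p) c n := by
  obtain ⟨ps, hps⟩ := List.getLast?_eq_some_iff.mp hLast
  have hpair := posNat_pairwise t c
  rw [hps] at hpair
  have hallps : ∀ a ∈ ps, a < p := fun a ha => (List.pairwise_append.mp hpair).2.2 a ha p (by simp)
  have hpmem : p ∈ posNat t c := List.mem_of_getLast? hLast
  have hplen : p < t.length := by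
    obtain ⟨_, h2⟩ := (mem_posNat t c p).mp hpmem
    by_contra hge; rw [List.getElem?_eq_none (by omega)] at h2; simp at h2
  have htakelen : (t.take p).length = p := by simp [List.length_take]; omega
  have htakepos : posNat (t.take p) c = ps := by
    rw [posNat_take, hps, List.filter_append]
    have h1 : ps.filter (fun i => decide (i < p)) = ps :=
      List.filter_eq_self.mpr (fun a ha => by simpa using hallps a ha)
    simp [h1]
  by_cases hp : (p : Int) ≤ n
  · rw [if_pos hp]
    simp only [bStep, if_pos hn, bPositions_eq, hps]
    rw [if_neg (by simp)]
    have h1 : [p].filter (fun (i : Nat) => decide ((i : Int) ≤ n)) = [p] := by simp [hp]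
    rw [keep_map, List.filter_append, h1]
    simp only [List.map_append, List.map_cons, List.map_nil, List.getLast?_concat]
    rw [PySem.List.slice_to t (by omega)]
    simp
  · rw [if_neg hp]
    have hn' : ((t.take p).length : Int) > n := by rw [htakelen]; omega
    have h0 : [p].filter (fun (i : Nat) => decide ((i : Int) ≤ n)) = [] := by simp [hp]
    cases ps with
    | nil =>
      simp only [bStep, if_pos hn, if_pos hn', bPositions_eq, hps, htakepos]
      rw [if_neg (by simp), if_pos (by simp)]
      rw [keep_map, List.filter_append, h0]
      simp only [List.filter_nil, List.nil_append, List.map_nil, List.getLast?_nil,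
        List.nil_append, List.map_cons, List.headD_cons]
      rw [PySem.List.slice_to t (by omega)]
      simp
    | cons q ps' =>
      simp only [bStep, if_pos hn, if_pos hn', bPositions_eq, hps, htakepos]
      rw [if_neg (by simp), if_neg (by simp)]
      rw [keep_map, keep_map, List.filter_append, h0, List.append_nil]
      cases hK : ((q :: ps').filter (fun (i : Nat) => decide ((i : Int) ≤ n))).getLast? with
      | none =>
        simp only [List.getLast?_map, hK, Option.map_none]
        have hq : q < p := hallps q (by simp)
        simp only [List.cons_append, List.map_cons, List.headD_cons]
        rw [PySem.List.slice_to t (by omega), PySem.List.slice_to _ (by omega),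
          List.take_take]
        congr 1
        simp
        omega
      | some k =>
        simp only [List.getLast?_map, hK, Option.map_some]
        have hkmem : k ∈ (q :: ps').filter (fun (i : Nat) => decide ((i : Int) ≤ n)) :=
          List.mem_of_getLast? hK
        have hk : k < p := hallps k (List.mem_of_mem_filter hkmem)
        rw [PySem.List.slice_to t (by omega), PySem.List.slice_to _ (by omega),
          List.take_take]
        congr 1
        simp
        omega

theorem step_eq (t : List Char) (c : Char) (n : Int) : aLoop t c n = bStep t c n := by
  have main : ∀ (N : Nat) (t : List Char), t.length ≤ N → aLoop t c n = bStep t c n := by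
    intro N
    induction N with
    | zero =>
      intro t ht
      have : t = [] := List.eq_nil_of_length_eq_zero (by omega)
      subst this
      rw [aLoop, bStep]
      have hrf : pyRfind1 [] c = -1 := (rfind1_eq_neg_iff [] c).mpr (by simp [posNat])
      rw [dif_neg (by simp [hrf])]
      split
      · rw [if_pos (by simp [bPositions])]
      · rfl
    | succ N ih =>
      intro t ht
      by_cases hn : (t.length : Int) > n
      · cases hLast : (posNat t c).getLast? with
        | none =>
          have hnil : posNat t c = [] := List.getLast?_eq_none_iff.mp hLast
          have hrf : pyRfind1 t c = -1 := (rfind1_eq_neg_iff t c).mpr hnil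
          rw [aLoop, dif_neg (by simp [hrf]), bStep, if_pos hn,
            if_pos (by simp [bPositions_eq, hnil])]
        | some p =>
          have hrf : pyRfind1 t c = (p : Int) := rfind1_getLast t c p hLast
          have hpmem := List.mem_of_getLast? hLast
          obtain ⟨hp1, hp2⟩ := (mem_posNat t c p).mp hpmem
          have hplen : p < t.length := by
            by_contra hge; rw [List.getElem?_eq_none (by omega)] at hp2; simp at hp2
          have hchop : aChop t (pyRfind1 t c) = t.take p := by
            rw [hrf, aChop_eq_take _ _ (by omega)]; simp
          rw [aLoop, dif_pos ⟨hn, by rw [hrf]; omega⟩, hchop]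
          rw [bStep_take t c n p hn hLast]
          by_cases hp : (p : Int) ≤ n
          · rw [if_pos hp, aLoop, dif_neg]
            push Not
            intro hlen
            exfalso
            rw [List.length_take] at hlen
            omega
          · rw [if_neg hp]
            exact ih (t.take p) (by rw [List.length_take]; omega)
      · rw [aLoop, dif_neg (by push Not; intro h; exact absurd h hn), bStep_of_le t c n hn]
  exact main t.length t le_rfl

theorem pyRange01 (n : Int) :
    PySem.List.pyRange 0 n 1 = (List.range n.toNat).map (fun (k : Nat) => (k : Int)) := by
  rw [PySem.List.pyRange_of_pos 0 n one_pos]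
  have hc : (if (0:Int) < n then ((n - 0 + 1 - 1) / 1).toNat else 0) = n.toNat := by
    split <;> omega
  rw [hc]
  simp

theorem blanks_eq (n : Int) : aBlanks n = PySem.List.pyRepeat [' '] (max n 0) := by
  rw [aBlanks, PySem.List.pyRepeat_singleton, pyRange01, List.map_map]
  simp only [Function.comp_def, List.map_const', List.length_range]
  congr 1
  omega

theorem center_ge (cs : List Char) (w : Int) : w ≤ ((pyCenter cs w).length : Int) := by
  rw [pyCenter]
  split
  · omega
  · rename_i h
    have hfd : PySem.Int.floordiv (w - (cs.length : Int)) 2 = (w - (cs.length : Int)) / 2 :=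
      PySem.Int.floordiv_eq_ediv_of_pos (by omega)
    have hb : PySem.Int.band (PySem.Int.band (w - (cs.length : Int)) w) 1 =
        PySem.Int.mod (PySem.Int.band (w - (cs.length : Int)) w) 2 := PySem.Int.band_one _
    have h0 : 0 ≤ PySem.Int.mod (PySem.Int.band (w - (cs.length : Int)) w) 2 :=
      PySem.Int.mod_nonneg _ (by omega)
    have h1 : PySem.Int.mod (PySem.Int.band (w - (cs.length : Int)) w) 2 < 2 :=
      PySem.Int.mod_lt _ (by omega)
    simp only [List.length_append, List.length_replicate]
    rw [hfd, hb]
    push_cast [Int.toNat_of_nonneg]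
    omega

theorem map_getD_range_take {α : Type} (xs : List α) (d : α) (m : Nat) (h : m ≤ xs.length) :
    (List.range m).map (fun (k : Nat) => PySem.List.pyGetD xs (k : Int) d) = xs.take m := by
  apply List.ext_getElem
  · simp; omega
  · intro i h1 h2
    simp only [List.getElem_map, List.getElem_range, List.getElem_take]
    simp at h1
    rw [PySem.List.pyGetD_eq_getElem xs d (by exact_mod_cast Nat.zero_le _) (by exact_mod_cast by omega)]
    simp

theorem foldl_bStep_id (l : List Char) (n : Int) (ums : List Char)
    (h : ¬ (l.length : Int) > n) :
    List.foldl (fun u um => bStep u um n) l ums = l := by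
  induction ums with
  | nil => rfl
  | cons um rest ih =>
    simp only [List.foldl_cons, bStep_of_le l um n h]
    exact ih

theorem final_eq (t : List Char) (n : Int) :
    String.ofList ((PySem.List.pyRange 0 n 1).map (fun i => PySem.List.pyGetD (pyCenter t n) i ' ')) =
      if 0 < n then String.ofList (PySem.List.slice (pyCenter t n) none (some n)) else "" := by
  by_cases hn : 0 < n
  · rw [if_pos hn, PySem.List.slice_to _ (by omega), pyRange01, List.map_map]
    have hlen : n.toNat ≤ (pyCenter t n).length := by
      have := center_ge t n
      omega
    congr 1
    simp only [Function.comp_def]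
    exact map_getD_range_take (pyCenter t n) ' ' n.toNat hlen
  · rw [if_neg hn, pyRange01]
    have : n.toNat = 0 := by omega
    rw [this]
    rfl

theorem cond_iff (t0 : List Char) (n : Int) :
    ((t0.length : Int) > n ∧ PySem.Chars.endswith t0 ['d','B'] = true ∧ PySem.Chars.find t0 ['.'] ≠ -1) ↔
    ((t0.length : Int) > n ∧ PySem.Chars.endswith t0 ['d','B'] = true ∧ PySem.Chars.isIn ['.'] t0 = true) := by
  refine and_congr Iff.rfl (and_congr Iff.rfl ?_)
  rw [PySem.Chars.find_ne_neg_one_iff, PySem.Chars.isIn_iff_infix]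

theorem tail_eq (t1 : List Char) (n : Int) :
    String.ofList ((PySem.List.pyRange 0 n 1).map (fun i => PySem.List.pyGetD
        (pyCenter (if (t1.length : Int) > n
          then List.foldl (fun u um => aLoop u um n) t1 [' ', 'i', 'o', 'u', 'e', 'a']
          else t1) n) i ' ')) =
      (if 0 < n then String.ofList (PySem.List.slice
        (pyCenter (List.foldl (fun u um => bStep u um n) t1 [' ', 'i', 'o', 'u', 'e', 'a']) n)
        none (some n)) else "") := by
  have h2 : (if (t1.length : Int) > n
      then List.foldl (fun u um => aLoop u um n) t1 [' ', 'i', 'o', 'u', 'e', 'a']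
      else t1) = List.foldl (fun u um => bStep u um n) t1 [' ', 'i', 'o', 'u', 'e', 'a'] := by
    have hfun : (fun (u : List Char) (um : Char) => aLoop u um n) = (fun u um => bStep u um n) :=
      funext fun u => funext fun um => step_eq u um n
    split
    · rw [hfun]
    · rename_i hle
      exact (foldl_bStep_id t1 n _ hle).symm
  rw [h2]
  exact final_eq _ n

-- ===== VERDICT (by name: the statement is the Claim_ definition above) =====
theorem transform_to_size_py_spec : Claim_equal_transform_to_size_py := by
  unfold Claim_equal_transform_to_size_py
  intro raw_text new_size _
  unfold Spec_transform_to_size_py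
  cases raw_text with
  | none =>
    simp only [transform_to_size_py, transform_to_size_py_alt]
    rw [blanks_eq]
  | some s =>
    simp only [transform_to_size_py, transform_to_size_py_alt]
    by_cases hs : s.toList = []
    · rw [if_pos hs, if_pos hs, blanks_eq]
    · rw [if_neg hs, if_neg hs,
        if_congr (cond_iff (PySem.Chars.strip s.toList) new_size) rfl rfl]
      exact tail_eq _ new_size
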